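-- pv_equiv track=rewrite | github.com/mccredie/nonogram | nonogram.py | iter_eliminate_impossibilities
-- ===== SOURCE A (Python) =====
-- def iter_eliminate_impossibilities(truth, possibilities):
--     for possibility in possibilities:
--         keep = True
--         for i, value in enumerate(truth):
--             if value == '?':
--                 continue
--             elif value != possibility[i]:
--                 keep = False
--                 break
--         if keep:
--             yield possibility
-- ===== SOURCE B (Python) =====
-- def iter_eliminate_impossibilities(truth, possibilities):
--     # Constraint-major staged filtering: narrow the whole candidate set one
--     # constrained position at a time, then yield the survivors in order.
--     alive = list(possibilities)
--     for i, value in enumerate(truth):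
--         if value != '?':
--             alive = [p for p in alive if p[i] == value]
--     yield from alive
-- ===== Notes on version B (the rewrite author's own statement) =====
-- stated objective: alternative
-- what changed: B inverts the loop nesting: instead of iterating candidates and scanning truth per candidate with a break, it iterates over the constrained positions of truth and narrows the whole surviving candidate list with one filtering pass per constraint, yielding the survivors at the end.
import Mathlib
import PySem

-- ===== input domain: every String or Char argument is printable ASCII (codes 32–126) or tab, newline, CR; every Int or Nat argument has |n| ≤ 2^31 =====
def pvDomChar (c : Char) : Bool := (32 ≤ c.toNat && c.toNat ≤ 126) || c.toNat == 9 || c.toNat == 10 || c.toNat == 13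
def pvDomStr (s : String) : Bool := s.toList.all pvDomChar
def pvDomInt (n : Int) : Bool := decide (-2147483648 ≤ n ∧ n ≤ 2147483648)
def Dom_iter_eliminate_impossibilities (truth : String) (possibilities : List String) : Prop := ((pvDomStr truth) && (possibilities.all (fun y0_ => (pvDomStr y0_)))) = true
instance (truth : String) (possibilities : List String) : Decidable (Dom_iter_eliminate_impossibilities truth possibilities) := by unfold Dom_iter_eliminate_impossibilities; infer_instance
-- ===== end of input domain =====

-- B inverts the loop nesting: it iterates over the constrained positions of truth and
-- narrows the whole candidate list one filtering pass per constraint, instead of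
-- scanning truth per candidate; an alternative of the same cost.
-- Equivalence is about the list of yielded values (both Pythons are generators).

-- ===== PORT A =====
-- inner loop of A: for i, value in enumerate(truth): skip '?', break on mismatch.
-- pyGet? = none is Python's IndexError; such inputs are excluded by Pre_ below, the
-- port returns `false` (drops the candidate) there.
def pvCheckA (p : List Char) : List (Int × Char) → Bool
  | [] => true
  | (i, v) :: rest =>
    if v = '?' then pvCheckA p rest
    else match PySem.List.pyGet? p i with
      | some x => if v ≠ x then false else pvCheckA p rest
      | none => false

def iter_eliminate_impossibilities (truth : String) (possibilities : List String) : List String :=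
  possibilities.filter (fun p => pvCheckA p.toList (PySem.List.enumerate truth.toList 0))

-- ===== PORT B =====
-- fold over enumerate(truth): at each non-'?' position filter the surviving list.
-- pyGet? = none (Python's IndexError) drops the candidate; those inputs are outside Pre_.
def iter_eliminate_impossibilities_alt (truth : String) (possibilities : List String) : List String :=
  (PySem.List.enumerate truth.toList 0).foldl
    (fun alive iv =>
      if iv.2 ≠ '?' then alive.filter (fun p => PySem.List.pyGet? p.toList iv.1 == some iv.2)
      else alive)
    possibilities

-- ===== PRECONDITION & SPEC =====
-- Pre_ excludes exactly the inputs on which Python A raises IndexError: a possibility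
-- shorter than some non-'?' position of truth, not shielded by an earlier in-range
-- non-'?' mismatch. Python B raises on exactly the same inputs. Stated as a lockstep
-- walk of truth and candidate (a shape condition on the input, not either port's code).
def pvNoIndexError : List Char → List Char → Bool
  | [], _ => true
  | v :: ts, [] => v = '?' && pvNoIndexError ts []
  | v :: ts, c :: cs => if v = '?' then pvNoIndexError ts cs
      else if v ≠ c then true else pvNoIndexError ts cs

def Pre_iter_eliminate_impossibilities (truth : String) (possibilities : List String) : Prop :=
  possibilities.all (fun p => pvNoIndexError truth.toList p.toList) = true
instance (truth : String) (possibilities : List String) : Decidable (Pre_iter_eliminate_impossibilities truth possibilities) := by unfold Pre_iter_eliminate_impossibilities; infer_instance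

def pvWitness_iter_eliminate_impossibilities : String × List String := ("a?b", ["axb", "ayb", "Xyb"])

def Spec_iter_eliminate_impossibilities (truth : String) (possibilities : List String) (out : List String) : Prop := out = iter_eliminate_impossibilities_alt truth possibilities
instance (truth : String) (possibilities : List String) (out : List String) : Decidable (Spec_iter_eliminate_impossibilities truth possibilities out) := by unfold Spec_iter_eliminate_impossibilities; infer_instance

-- ===== CLAIM (what is proved, stated in full; the proofs are below) =====
def Claim_equal_iter_eliminate_impossibilities : Prop := ∀ (truth : String) (possibilities : List String), Dom_iter_eliminate_impossibilities truth possibilities → Pre_iter_eliminate_impossibilities truth possibilities → Spec_iter_eliminate_impossibilities truth possibilities (iter_eliminate_impossibilities truth possibilities)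

-- ===== LEMMAS AND PROOFS =====

-- the per-position test both programs implicitly share
def pvOk (p : List Char) (iv : Int × Char) : Bool :=
  iv.2 == '?' || (PySem.List.pyGet? p iv.1 == some iv.2)

-- A's break-on-mismatch scan computes the conjunction of pvOk over all positions.
theorem pvCheckA_eq_all (p : List Char) (l : List (Int × Char)) :
    pvCheckA p l = l.all (pvOk p) := by
  induction l with
  | nil => rfl
  | cons hd tl ih =>
    obtain ⟨i, v⟩ := hd
    by_cases hv : v = '?'
    · simp [pvCheckA, pvOk, hv, ih]
    · cases hg : PySem.List.pyGet? p i with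
      | none => simp [pvCheckA, pvOk, hv, hg]
      | some x =>
        by_cases hx : v = x
        · simp [pvCheckA, pvOk, hg, hx, ih]
        · simp [pvCheckA, pvOk, hv, hg, hx, Ne.symm hx]

-- B's staged filtering computes one filter by the same conjunction.
theorem pvFoldFilter_eq_filter_all (l : List (Int × Char)) (alive : List String) :
    l.foldl
      (fun alive iv =>
        if iv.2 ≠ '?' then alive.filter (fun p => PySem.List.pyGet? p.toList iv.1 == some iv.2)
        else alive)
      alive
    = alive.filter (fun p => l.all (pvOk p.toList)) := by
  induction l generalizing alive with
  | nil => simp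
  | cons hd tl ih =>
    obtain ⟨i, v⟩ := hd
    by_cases hv : v = '?'
    · simp only [List.foldl_cons, hv, ne_eq, not_true_eq_false, if_false, ih]
      refine List.filter_congr (fun p _ => ?_)
      simp [pvOk]
    · simp only [List.foldl_cons, hv, ne_eq, not_false_eq_true, if_true, ih,
        List.filter_filter]
      refine List.filter_congr (fun p _ => ?_)
      have hvb : (v == '?') = false := by simp [hv]
      simp [pvOk, hvb, Bool.and_comm]

-- ===== VERDICT (by name: the statement is the Claim_ definition above) =====
theorem iter_eliminate_impossibilities_spec : Claim_equal_iter_eliminate_impossibilities := by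
  intro truth possibilities _ _
  unfold Spec_iter_eliminate_impossibilities iter_eliminate_impossibilities iter_eliminate_impossibilities_alt
  rw [pvFoldFilter_eq_filter_all]
  simp only [pvCheckA_eq_all]
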